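-- pv_equiv track=rewrite | github.com/Kharoh/wolfram-automata | src/properties.py | is_additive_by_test
-- ===== SOURCE A (Python) =====
-- def is_additive_by_test(rule_number: int) -> bool:
--     """
--     Determines if a Wolfram rule is additive by testing its linear properties.
--
--     An additive rule must be expressible as a linear combination (XOR sum)
--     of its three input cells. This function derives the potential linear
--     coefficients and verifies if they hold for all 8 neighborhoods.
--
--     Args:
--         rule_number (int): The elementary cellular automaton rule (0-255).
--
--     Returns:
--         bool: True if the rule is computationally verified as additive, False otherwise.
--     """
--     if not 0 <= rule_number <= 255:
--         raise ValueError("Rule number must be between 0 and 255.")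
--
--     # Convert the rule number to its 8-bit binary representation.
--     # The bits correspond to neighborhoods from '111' (index 0) down to '000' (index 7).
--     rule_bin = format(rule_number, "08b")
--
--     # --- Step 1: Deduce the potential linear coefficients ---
--     # If the rule is additive, its behavior on the "basis vectors"
--     # reveals the coefficients of the linear function.
--     # The output for (1,0,0) gives the left coefficient, (0,1,0) the center, etc.
--     # Neighborhood '100' (4) -> bit 3
--     # Neighborhood '010' (2) -> bit 5
--     # Neighborhood '001' (1) -> bit 6
--     w_left = int(rule_bin[3])
--     w_center = int(rule_bin[5])
--     w_right = int(rule_bin[6])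
--
--     # --- Step 2: Verify the derived linear formula for all 8 neighborhoods ---
--     for i in range(8):
--         # Get the neighborhood (l, c, r) from the index i
--         # Example: i=0 -> neighborhood '111'
--         l = (i >> 2) & 1
--         c = (i >> 1) & 1
--         r = i & 1
--
--         # Calculate the expected output based on the linear formula
--         expected_output = (w_left & l) ^ (w_center & c) ^ (w_right & r)
--
--         # Get the actual output from the rule's definition
--         # The rule's binary string is ordered from '111' down to '000'.
--         actual_output = int(rule_bin[7 - i])
--
--         # If the actual output does not match the predicted linear output,
--         # the rule is not additive.
--         if expected_output != actual_output:
--             return False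
--
--     # If the formula holds for all 8 neighborhoods, the rule is additive.
--     return True
-- ===== SOURCE B (Python) =====
-- def is_additive_by_test(rule_number: int) -> bool:
--     if not 0 <= rule_number <= 255:
--         raise ValueError("Rule number must be between 0 and 255.")
--
--     # Build the set of all additive rules: one rule per coefficient triple
--     # (wl, wc, wr), whose output on neighborhood (l, c, r) is the XOR sum.
--     additive_rules = set()
--     for w in range(8):
--         wl, wc, wr = (w >> 2) & 1, (w >> 1) & 1, w & 1
--         rule = 0
--         for i in range(8):
--             l, c, r = (i >> 2) & 1, (i >> 1) & 1, i & 1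
--             rule += ((wl & l) ^ (wc & c) ^ (wr & r)) << i
--         additive_rules.add(rule)
--
--     return rule_number in additive_rules
-- ===== Notes on version B (the rewrite author's own statement) =====
-- stated objective: alternative
-- what changed: B generates the full set of additive rule numbers from all XOR-coefficient triples and answers by membership, instead of A's derive-coefficients-from-basis-rows-then-verify-all-neighborhoods loop.
import Mathlib
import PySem

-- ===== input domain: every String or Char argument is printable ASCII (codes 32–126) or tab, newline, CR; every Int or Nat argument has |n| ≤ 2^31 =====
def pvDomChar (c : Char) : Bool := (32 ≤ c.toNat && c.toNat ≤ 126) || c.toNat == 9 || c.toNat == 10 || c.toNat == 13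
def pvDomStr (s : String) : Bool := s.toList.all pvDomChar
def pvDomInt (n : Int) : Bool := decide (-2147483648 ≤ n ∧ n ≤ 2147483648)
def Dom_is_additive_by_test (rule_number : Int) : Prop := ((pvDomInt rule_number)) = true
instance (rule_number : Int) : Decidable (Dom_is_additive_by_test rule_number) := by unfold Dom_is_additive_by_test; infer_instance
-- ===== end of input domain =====

-- B replaces A's derive-coefficients-then-verify loop by generating the set of all
-- additive rules from every coefficient triple and testing membership (objective: alternative).
-- Both raise ValueError outside 0..255 (excluded by Pre_).

-- ===== PORT A =====
-- format(rule_number, "08b") as the list of bits, most significant first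
-- (exact for 0 ≤ rule_number ≤ 255, which Pre_ guarantees).
def pvRuleBin (rule_number : Int) : List Int :=
  (List.range 8).map (fun k => (rule_number / Int.pow 2 (7 - k)) % 2)

def is_additive_by_test (rule_number : Int) : Bool :=
  let rule_bin := pvRuleBin rule_number
  let w_left := (PySem.List.pyGet? rule_bin 3).getD 0    -- index always in range (length 8)
  let w_center := (PySem.List.pyGet? rule_bin 5).getD 0
  let w_right := (PySem.List.pyGet? rule_bin 6).getD 0
  -- for i in range(8): early `return False` on mismatch ≡ all tests pass
  (PySem.List.pyRange 0 8 1).all (fun i =>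
    let l := Int.land (Int.shiftRight i 2) 1
    let c := Int.land (Int.shiftRight i 1) 1
    let r := Int.land i 1
    let expected_output := Int.xor (Int.xor (Int.land w_left l) (Int.land w_center c)) (Int.land w_right r)
    let actual_output := (PySem.List.pyGet? rule_bin (7 - i)).getD 0  -- index always in range
    expected_output == actual_output)

-- ===== PORT B =====
def is_additive_by_test_alt (rule_number : Int) : Bool :=
  let additive_rules : PySem.Set Int :=
    (PySem.List.pyRange 0 8 1).foldl (fun s w =>
      let wl := Int.land (Int.shiftRight w 2) 1
      let wc := Int.land (Int.shiftRight w 1) 1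
      let wr := Int.land w 1
      let rule := (PySem.List.pyRange 0 8 1).foldl (fun acc i =>
        let l := Int.land (Int.shiftRight i 2) 1
        let c := Int.land (Int.shiftRight i 1) 1
        let r := Int.land i 1
        acc + Int.shiftLeft (Int.xor (Int.xor (Int.land wl l) (Int.land wc c)) (Int.land wr r)) i.toNat) (0:Int)
      PySem.Set.add s rule) PySem.Set.empty
  PySem.Set.contains additive_rules rule_number

-- ===== PRECONDITION & SPEC =====
-- Pre_ excludes exactly the inputs where A raises ValueError (rule_number outside 0..255).
def Pre_is_additive_by_test (rule_number : Int) : Prop := 0 ≤ rule_number ∧ rule_number ≤ 255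
instance (rule_number : Int) : Decidable (Pre_is_additive_by_test rule_number) := by
  unfold Pre_is_additive_by_test; infer_instance
def pvWitness_is_additive_by_test : Int := (90)

def Spec_is_additive_by_test (rule_number : Int) (out : Bool) : Prop := out = is_additive_by_test_alt rule_number
instance (rule_number : Int) (out : Bool) : Decidable (Spec_is_additive_by_test rule_number out) := by unfold Spec_is_additive_by_test; infer_instance

-- ===== CLAIM (what is proved, stated in full; the proofs are below) =====
def Claim_equal_is_additive_by_test : Prop := ∀ (rule_number : Int), Dom_is_additive_by_test rule_number → Pre_is_additive_by_test rule_number → Spec_is_additive_by_test rule_number (is_additive_by_test rule_number)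

-- ===== LEMMAS AND PROOFS =====
set_option maxHeartbeats 2000000 in
set_option maxRecDepth 4000 in
theorem pv_agree_fin : ∀ m : Fin 256, is_additive_by_test (m : Int) = is_additive_by_test_alt (m : Int) := by
  decide

-- ===== VERDICT (by name: the statement is the Claim_ definition above) =====
theorem is_additive_by_test_spec : Claim_equal_is_additive_by_test := by
  intro n _ hpre
  unfold Spec_is_additive_by_test
  obtain ⟨h0, h255⟩ := hpre
  have hm : n = ((⟨n.toNat, by omega⟩ : Fin 256) : Int) := by simp; omega
  rw [hm]
  exact pv_agree_fin _
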